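-- pv_equiv track=rewrite | github.com/Ignul/UdemyCourses | Section_04/assignment_08.py | sum78
-- ===== SOURCE A (Python) =====
-- def sum78(int_list):
--     result = 0
--     flag = True
--     for item in int_list:
--         if item == 7:
--             flag = False
--         # We need to skip adding the 8 if it's the first occurence. However if there's an 8 without 7
--         # we need to add it.
--         if item == 8 and flag:
--             result += 8
--         if item == 8:
--             flag = True
--             continue
--         if flag:
--             result += item
--         if len(int_list) == 0:
--             return 0
--
--     return result
-- ===== SOURCE B (Python) =====
-- def sum78(int_list):
--     result = 0
--     it = iter(int_list)
--     for item in it: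
--         if item == 7:
--             for nxt in it:
--                 if nxt == 8:
--                     break
--         else:
--             result += item
--     return result
-- ===== Notes on version B (the rewrite author's own statement) =====
-- stated objective: simpler
-- what changed: Replaces A's per-element boolean flag state machine (with three separate item tests and a dead empty-list return inside the loop) by a nested iterator-consuming loop: on a 7 an inner loop consumes the section up to and including its closing 8, otherwise the item is added.
import Mathlib
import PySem

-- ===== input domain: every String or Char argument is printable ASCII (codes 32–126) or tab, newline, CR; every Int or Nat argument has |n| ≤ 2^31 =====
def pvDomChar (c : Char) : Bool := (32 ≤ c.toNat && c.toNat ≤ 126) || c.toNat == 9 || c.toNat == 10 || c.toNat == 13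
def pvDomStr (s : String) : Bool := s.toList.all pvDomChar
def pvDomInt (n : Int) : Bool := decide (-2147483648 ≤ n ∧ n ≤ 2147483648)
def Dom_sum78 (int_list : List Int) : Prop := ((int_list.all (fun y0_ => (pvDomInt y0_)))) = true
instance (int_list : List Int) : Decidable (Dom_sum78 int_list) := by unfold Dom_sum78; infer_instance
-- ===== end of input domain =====

-- B replaces A's per-element flag state machine by nested loops (inner loop consumes a
-- 7…8 section); same O(n) cost, simpler control flow. Equivalence of return values proved.

-- ===== PORT A =====
-- literal transliteration of A's loop: state (result, flag), with A's dead
-- `if len(int_list) == 0: return 0` inside the loop body kept as a branch.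
def sum78Loop (orig : List Int) (xs : List Int) (result : Int) (flag : Bool) : Int :=
  match xs with
  | [] => result
  | item :: rest =>
    let flag := if item == 7 then false else flag
    let result := if item == 8 && flag then result + 8 else result
    if item == 8 then
      sum78Loop orig rest result true
    else
      let result := if flag then result + item else result
      if orig.length == 0 then 0
      else sum78Loop orig rest result flag

def sum78 (int_list : List Int) : Int := sum78Loop int_list int_list 0 true

-- ===== PORT B =====
-- B's inner `for nxt in it: if nxt == 8: break`: consume up to and including the first 8
def skip8 : List Int → List Int
  | [] => []
  | nxt :: rest => if nxt == 8 then rest else skip8 rest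

theorem skip8_length_le (xs : List Int) : (skip8 xs).length ≤ xs.length := by
  induction xs with
  | nil => simp [skip8]
  | cons x rest ih =>
    simp only [skip8]
    split
    · simp
    · exact Nat.le_succ_of_le ih

-- B's outer loop over the shared iterator, with the accumulator `result`
def sum78AltLoop (xs : List Int) (result : Int) : Int :=
  match xs with
  | [] => result
  | item :: rest =>
    if item == 7 then sum78AltLoop (skip8 rest) result
    else sum78AltLoop rest (result + item)
termination_by xs.length
decreasing_by
  · exact Nat.lt_succ_of_le (skip8_length_le rest)
  · simp

def sum78_alt (int_list : List Int) : Int := sum78AltLoop int_list 0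

-- ===== PRECONDITION & SPEC =====
def Spec_sum78 (int_list : List Int) (out : Int) : Prop := out = sum78_alt int_list
instance (int_list : List Int) (out : Int) : Decidable (Spec_sum78 int_list out) := by unfold Spec_sum78; infer_instance

-- ===== CLAIM (what is proved, stated in full; the proofs are below) =====
def Claim_equal_sum78 : Prop := ∀ (int_list : List Int), Dom_sum78 int_list → Spec_sum78 int_list (sum78 int_list)

-- ===== LEMMAS AND PROOFS =====

-- with flag = false, A's loop just scans to the first 8 and resumes with flag = true
theorem sum78Loop_false (orig : List Int) (horig : orig.length ≠ 0)
    (xs : List Int) (r : Int) :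
    sum78Loop orig xs r false = sum78Loop orig (skip8 xs) r true := by
  induction xs with
  | nil => simp [skip8, sum78Loop]
  | cons item rest ih =>
    by_cases h8 : item = 8
    · subst h8; simp [sum78Loop, skip8]
    · simp [sum78Loop, skip8, h8, horig, ih]

-- loop invariant: with flag = true, A's loop equals B's loop from the same accumulator
theorem sum78Loop_true (orig : List Int) (horig : orig.length ≠ 0)
    (xs : List Int) (r : Int) :
    sum78Loop orig xs r true = sum78AltLoop xs r := by
  induction hn : xs.length using Nat.strong_induction_on generalizing xs r with
  | _ n ih =>
    match xs with
    | [] => simp [sum78Loop, sum78AltLoop]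
    | item :: rest =>
      by_cases h7 : item = 7
      · subst h7
        have h1 : sum78Loop orig (7 :: rest) r true = sum78Loop orig rest r false := by
          simp [sum78Loop, horig]
        rw [h1, sum78Loop_false orig horig,
            ih (skip8 rest).length (by subst hn; exact Nat.lt_succ_of_le (skip8_length_le rest)) _ _ rfl]
        simp [sum78AltLoop]
      · by_cases h8 : item = 8
        · subst h8
          have h1 : sum78Loop orig (8 :: rest) r true = sum78Loop orig rest (r + 8) true := by
            simp [sum78Loop]
          rw [h1, ih rest.length (by subst hn; exact Nat.lt_succ_self _) _ _ rfl]
          simp [sum78AltLoop]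
        · have h1 : sum78Loop orig (item :: rest) r true = sum78Loop orig rest (r + item) true := by
            simp [sum78Loop, h7, h8, horig]
          rw [h1, ih rest.length (by subst hn; exact Nat.lt_succ_self _) _ _ rfl]
          simp [sum78AltLoop, h7]

-- ===== VERDICT (by name: the statement is the Claim_ definition above) =====
theorem sum78_spec : Claim_equal_sum78 := by
  intro l _
  unfold Spec_sum78 sum78 sum78_alt
  match l with
  | [] => simp [sum78Loop, sum78AltLoop]
  | x :: rest => exact sum78Loop_true (x :: rest) (by simp) (x :: rest) 0
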